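-- pv_equiv track=rewrite | github.com/smsxgz/dailyprogrammer | LYNE/screen.py | find_levels
-- ===== SOURCE A (Python) =====
-- def find_levels(xs):
--     levels = []
--     while len(xs) > 0:
--         min_x = min(xs)
--         tmp = []
--         tmp_xs = []
--         for x in xs:
--             if abs(x - min_x) < 10:
--                 tmp.append(x)
--             else:
--                 tmp_xs.append(x)
--
--         xs = tmp_xs
--         levels.append(sum(tmp) // len(tmp))
--     return levels
-- ===== SOURCE B (Python) =====
-- def find_levels(xs):
--     levels = []
--     cur = 0
--     s = 0
--     c = 0
--     for x in sorted(xs):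
--         if c > 0 and x - cur < 10:
--             s += x
--             c += 1
--         else:
--             if c > 0:
--                 levels.append(s // c)
--             cur = x
--             s = x
--             c = 1
--     if c > 0:
--         levels.append(s // c)
--     return levels
-- ===== Notes on version B (the rewrite author's own statement) =====
-- stated objective: faster
-- what changed: Instead of repeatedly scanning the remaining list for its minimum and partitioning it (a pass per level), B sorts once and makes a single linear sweep, closing a cluster whenever the next value is >= 10 above the cluster's first (minimal) element.
import Mathlib
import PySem

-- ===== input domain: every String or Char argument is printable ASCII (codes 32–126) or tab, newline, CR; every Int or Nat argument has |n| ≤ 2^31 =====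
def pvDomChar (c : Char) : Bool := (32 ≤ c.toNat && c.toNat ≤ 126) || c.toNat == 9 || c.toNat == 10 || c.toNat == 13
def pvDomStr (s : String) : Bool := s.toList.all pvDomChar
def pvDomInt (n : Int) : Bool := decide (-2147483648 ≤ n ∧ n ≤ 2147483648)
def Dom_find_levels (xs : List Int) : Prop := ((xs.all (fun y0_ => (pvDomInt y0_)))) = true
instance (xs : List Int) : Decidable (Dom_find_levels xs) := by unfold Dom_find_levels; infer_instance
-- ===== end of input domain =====

-- B sorts once and groups in a single sweep instead of A's pass-per-level min/partition scans; objective: faster (asymptotic).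

-- ===== PORT A =====
-- helper naming A's for-loop (two-way partition of xs around min_x)
def aPartition (m : Int) (xs : List Int) : List Int × List Int :=
  xs.foldl (fun (p : List Int × List Int) x =>
    if |x - m| < 10 then (p.1 ++ [x], p.2) else (p.1, p.2 ++ [x])) ([], [])

-- A's while-loop; fuel = xs.length suffices because each iteration removes the minimum
def aLoop (fuel : Nat) (xs : List Int) : List Int :=
  match fuel with
  | 0 => []
  | fuel + 1 =>
    match PySem.List.min? xs (fun y => y) with
    | none => []
    | some m =>
      let p := aPartition m xs
      PySem.Int.floordiv p.1.sum (p.1.length : Int) :: aLoop fuel p.2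

def find_levels (xs : List Int) : List Int := aLoop xs.length xs

-- ===== PORT B =====
-- helpers naming Source B's loop body and the final flush
def bStep (st : List Int × Int × Int × Int) (x : Int) : List Int × Int × Int × Int :=
  if 0 < st.2.2.2 ∧ x - st.2.1 < 10 then (st.1, st.2.1, st.2.2.1 + x, st.2.2.2 + 1)
  else ((if 0 < st.2.2.2 then st.1 ++ [PySem.Int.floordiv st.2.2.1 st.2.2.2] else st.1), x, x, 1)

def bFinish (st : List Int × Int × Int × Int) : List Int :=
  if 0 < st.2.2.2 then st.1 ++ [PySem.Int.floordiv st.2.2.1 st.2.2.2] else st.1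

def find_levels_alt (xs : List Int) : List Int :=
  bFinish ((PySem.List.sorted xs (fun y => y) false).foldl bStep ([], 0, 0, 0))

-- ===== PRECONDITION & SPEC =====
def Spec_find_levels (xs : List Int) (out : List Int) : Prop := out = find_levels_alt xs
instance (xs : List Int) (out : List Int) : Decidable (Spec_find_levels xs out) := by unfold Spec_find_levels; infer_instance

-- ===== CLAIM (what is proved, stated in full; the proofs are below) =====
def Claim_equal_find_levels : Prop := ∀ (xs : List Int), Dom_find_levels xs → Spec_find_levels xs (find_levels xs)

-- ===== LEMMAS AND PROOFS =====

-- the partition loop is a pair of filters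
theorem pvPartition_eq (m : Int) (xs : List Int) :
    aPartition m xs = (xs.filter (fun x => decide (|x - m| < 10)),
                       xs.filter (fun x => !decide (|x - m| < 10))) := by
  have H : ∀ (l a b : List Int),
      l.foldl (fun (p : List Int × List Int) x =>
        if |x - m| < 10 then (p.1 ++ [x], p.2) else (p.1, p.2 ++ [x])) (a, b)
      = (a ++ l.filter (fun x => decide (|x - m| < 10)),
         b ++ l.filter (fun x => !decide (|x - m| < 10))) := by
    intro l
    induction l with
    | nil => simp
    | cons x t ih =>
      intro a b
      by_cases h : |x - m| < 10 <;> simp [h, ih]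
  simpa using H xs [] []

-- the partition drops the minimum itself, so the leftover list is shorter
theorem pvPartition_snd_lt (m : Int) (xs : List Int) (hm : m ∈ xs) :
    (aPartition m xs).2.length < xs.length := by
  rw [pvPartition_eq]
  have h1 : (xs.filter (fun x => !decide (|x - m| < 10))).length ≤ xs.length :=
    List.length_filter_le _ _
  rcases Nat.lt_or_ge (xs.filter (fun x => !decide (|x - m| < 10))).length xs.length with h | h
  · exact h
  · exfalso
    have := (List.length_filter_eq_length_iff).1 (Nat.le_antisymm h1 h) m hm
    simp at this

-- unfolding equations of A's loop
theorem pvALoop_nil (n : Nat) : aLoop n [] = [] := by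
  cases n <;> rfl

theorem pvALoop_some (n : Nat) (xs : List Int) (m : Int)
    (h : PySem.List.min? xs (fun y => y) = some m) :
    aLoop (n + 1) xs = PySem.Int.floordiv (aPartition m xs).1.sum ((aPartition m xs).1.length : Int)
      :: aLoop n (aPartition m xs).2 := by
  simp only [aLoop, h]

-- reference function: levels of an ascending list, by group recursion
def levelsOfSorted : List Int → List Int
  | [] => []
  | y :: t =>
    PySem.Int.floordiv (y + (t.takeWhile (fun z => decide (z < y + 10))).sum)
      (1 + ((t.takeWhile (fun z => decide (z < y + 10))).length : Int))
    :: levelsOfSorted (t.dropWhile (fun z => decide (z < y + 10)))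
termination_by l => l.length
decreasing_by
  exact Nat.lt_succ_of_le (List.Sublist.length_le (List.dropWhile_sublist _))

-- on an ascending list, filtering by a downward-closed bound is take/dropWhile
theorem pvFilterTW (b : Int) : ∀ (l : List Int), l.Pairwise (· ≤ ·) →
    l.filter (fun x => decide (x < b)) = l.takeWhile (fun x => decide (x < b)) ∧
    l.filter (fun x => !decide (x < b)) = l.dropWhile (fun x => decide (x < b)) := by
  intro l
  induction l with
  | nil => simp
  | cons x t ih =>
    intro hp
    rcases List.pairwise_cons.1 hp with ⟨hx, pt⟩
    by_cases h : x < b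
    · have := ih pt
      simp [h, this.1, this.2]
    · have h1 : t.filter (fun z => decide (z < b)) = [] := by
        apply List.filter_eq_nil_iff.2
        intro z hz
        have := hx z hz
        simp only [decide_eq_true_eq]
        omega
      have h2 : t.filter (fun z => !decide (z < b)) = t := by
        apply List.filter_eq_self.2
        intro z hz
        have := hx z hz
        simp only [Bool.not_eq_true', decide_eq_false_iff_not]
        omega
      simp [h, h1, h2]

-- the sorted head is Python's min()
theorem pvMinHead (y : Int) (t : List Int) (hp : (y :: t).Pairwise (· ≤ ·)) :
    PySem.List.min? (y :: t) (fun z => z) = some y := by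
  rcases List.pairwise_cons.1 hp with ⟨hx, _⟩
  rw [PySem.List.min?_id_cons]
  congr 1
  have hle : t.foldl min y ≤ y := (PySem.List.foldl_min_le t y).1
  rcases PySem.List.foldl_min_mem t y with h | h
  · exact h
  · exact le_antisymm hle (hx _ h)

-- the sweep, started inside an open group, closes groups exactly as levelsOfSorted
theorem pvSweep : ∀ (t : List Int), t.Pairwise (· ≤ ·) →
    ∀ (L : List Int) (h s c : Int), 0 < c →
    bFinish (t.foldl bStep (L, h, s, c)) =
      L ++ [PySem.Int.floordiv (s + (t.takeWhile (fun z => decide (z < h + 10))).sum)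
              (c + ((t.takeWhile (fun z => decide (z < h + 10))).length : Int))]
        ++ levelsOfSorted (t.dropWhile (fun z => decide (z < h + 10))) := by
  intro t
  induction t with
  | nil =>
    intro _ L h s c hc
    simp [bFinish, hc, levelsOfSorted]
  | cons x t ih =>
    intro hp L h s c hc
    rcases List.pairwise_cons.1 hp with ⟨hx, pt⟩
    by_cases hlt : x < h + 10
    · have hstep : bStep (L, h, s, c) x = (L, h, s + x, c + 1) := by
        simp only [bStep]
        rw [if_pos ⟨hc, by omega⟩]
      rw [List.foldl_cons, hstep, ih pt L h (s + x) (c + 1) (by omega)]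
      have e1 : s + x + (t.takeWhile (fun z => decide (z < h + 10))).sum
          = s + (x + (t.takeWhile (fun z => decide (z < h + 10))).sum) := by ring
      have e2 : c + 1 + ((t.takeWhile (fun z => decide (z < h + 10))).length : Int)
          = c + (1 + ((t.takeWhile (fun z => decide (z < h + 10))).length : Int)) := by ring
      simp [hlt, e1, e2]
      ring_nf
    · have hstep : bStep (L, h, s, c) x = (L ++ [PySem.Int.floordiv s c], x, x, 1) := by
        simp only [bStep]
        rw [if_neg (by omega), if_pos hc]
      rw [List.foldl_cons, hstep, ih pt _ x x 1 (by omega)]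
      have htw : (x :: t).takeWhile (fun z => decide (z < h + 10)) = [] := by
        simp [hlt]
      have hdw : (x :: t).dropWhile (fun z => decide (z < h + 10)) = x :: t := by
        simp [hlt]
      rw [htw, hdw, levelsOfSorted]
      simp [List.append_assoc]

-- A on an ascending list computes levelsOfSorted
theorem pvAOnSorted : ∀ (n : Nat) (ys : List Int), ys.length ≤ n → ys.Pairwise (· ≤ ·) →
    aLoop n ys = levelsOfSorted ys := by
  intro n
  induction n with
  | zero =>
    intro ys hlen _
    have : ys = [] := List.length_eq_zero_iff.1 (Nat.le_zero.1 hlen)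
    subst this
    rw [pvALoop_nil, levelsOfSorted]
  | succ n ih =>
    intro ys hlen hp
    match ys with
    | [] => rw [pvALoop_nil, levelsOfSorted]
    | y :: t =>
      rcases List.pairwise_cons.1 hp with ⟨hx, pt⟩
      rw [pvALoop_some n (y :: t) y (pvMinHead y t hp)]
      simp only [pvPartition_eq]
      have hcy : decide (|y - y| < 10) = true := by simp
      have hcongr : ∀ x ∈ t, decide (|x - y| < 10) = decide (x < y + 10) := by
        intro x hxt
        have := hx x hxt
        rw [abs_of_nonneg (by omega : (0:Int) ≤ x - y)]
        exact decide_eq_decide.2 (by omega)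
      have hcongr' : ∀ x ∈ t, (!decide (|x - y| < 10)) = (!decide (x < y + 10)) := by
        intro x hxt; rw [hcongr x hxt]
      have ftw := pvFilterTW (y + 10) t pt
      have hfil1 : (y :: t).filter (fun x => decide (|x - y| < 10))
          = y :: t.takeWhile (fun z => decide (z < y + 10)) := by
        rw [List.filter_cons, if_pos hcy, List.filter_congr hcongr, ftw.1]
      have hfil2 : (y :: t).filter (fun x => !decide (|x - y| < 10))
          = t.dropWhile (fun z => decide (z < y + 10)) := by
        rw [List.filter_cons, if_neg (by simp), List.filter_congr hcongr', ftw.2]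
      rw [hfil1, hfil2]
      rw [levelsOfSorted]
      have hrec : aLoop n (t.dropWhile (fun z => decide (z < y + 10)))
          = levelsOfSorted (t.dropWhile (fun z => decide (z < y + 10))) := by
        apply ih
        · have := List.Sublist.length_le (List.dropWhile_sublist (l := t) (p := fun z => decide (z < y + 10)))
          simp at hlen
          omega
        · exact List.Pairwise.sublist (List.dropWhile_sublist _) pt
      rw [hrec]
      simp only [List.sum_cons, List.length_cons]
      push_cast
      ring_nf

-- A is minimum-and-multiset driven, hence invariant under permutation of its input
theorem pvAPerm : ∀ (n : Nat) (k : Nat) (xs ys : List Int), xs.length ≤ n → ys.length ≤ k →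
    xs.Perm ys → aLoop n xs = aLoop k ys := by
  intro n
  induction n with
  | zero =>
    intro k xs ys hlen _ hp
    have hx : xs = [] := List.length_eq_zero_iff.1 (Nat.le_zero.1 hlen)
    subst hx
    have : ys = [] := hp.nil_eq.symm
    subst this
    rw [pvALoop_nil, pvALoop_nil]
  | succ n ih =>
    intro k xs ys hlen hk hp
    match hmx : PySem.List.min? xs (fun y => y) with
    | none =>
      have hx : xs = [] := (PySem.List.min?_eq_none_iff _ _).1 hmx
      subst hx
      have : ys = [] := hp.nil_eq.symm
      subst this
      rw [pvALoop_nil, pvALoop_nil]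
    | some m =>
      have hmem : m ∈ xs := PySem.List.min?_mem hmx
      have hmemy : m ∈ ys := hp.mem_iff.1 hmem
      have hy : ∃ m', PySem.List.min? ys (fun y => y) = some m' := by
        cases hmy : PySem.List.min? ys (fun y => y) with
        | none =>
          exfalso
          have : ys = [] := (PySem.List.min?_eq_none_iff _ _).1 hmy
          subst this
          simp at hmemy
        | some m' => exact ⟨m', rfl⟩
      rcases hy with ⟨m', hmy⟩
      have hmm : m = m' := by
        have h1 := PySem.List.min?_isMin hmx
        have h2 := PySem.List.min?_isMin hmy
        have hm'x : m' ∈ xs := hp.mem_iff.2 (PySem.List.min?_mem hmy)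
        exact le_antisymm (h1 m' hm'x) (h2 m hmemy)
      subst hmm
      match k with
      | 0 =>
        exfalso
        have : ys = [] := List.length_eq_zero_iff.1 (Nat.le_zero.1 hk)
        subst this
        simp at hmemy
      | k + 1 =>
      rw [pvALoop_some n xs m hmx, pvALoop_some k ys m hmy]
      simp only [pvPartition_eq]
      have hperm1 := hp.filter (fun x => decide (|x - m| < 10))
      have hperm2 := hp.filter (fun x => !decide (|x - m| < 10))
      have hsum : (xs.filter (fun x => decide (|x - m| < 10))).sum
          = (ys.filter (fun x => decide (|x - m| < 10))).sum := hperm1.sum_eq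
      have hlen2 : (xs.filter (fun x => decide (|x - m| < 10))).length
          = (ys.filter (fun x => decide (|x - m| < 10))).length := hperm1.length_eq
      have hrec : aLoop n (xs.filter (fun x => !decide (|x - m| < 10)))
          = aLoop k (ys.filter (fun x => !decide (|x - m| < 10))) := by
        apply ih _ _ _ _ _ hperm2
        · have := pvPartition_snd_lt m xs hmem
          simp only [pvPartition_eq] at this
          omega
        · have := pvPartition_snd_lt m ys hmemy
          simp only [pvPartition_eq] at this
          omega
      simp only [hsum, hlen2, hrec]

-- B is the sweep started on the sorted list
theorem pvBEq (xs : List Int) :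
    find_levels_alt xs = levelsOfSorted (PySem.List.sorted xs (fun y => y) false) := by
  unfold find_levels_alt
  have hp : (PySem.List.sorted xs (fun y => y) false).Pairwise (· ≤ ·) := by
    simpa using PySem.List.sorted_pairwise xs (fun y => y)
  cases hs : PySem.List.sorted xs (fun y => y) false with
  | nil => simp [bFinish, levelsOfSorted]
  | cons y t =>
    rw [hs] at hp
    rcases List.pairwise_cons.1 hp with ⟨hx, pt⟩
    have hstep : bStep ([], 0, 0, 0) y = ([], y, y, 1) := by
      simp [bStep]
    rw [List.foldl_cons, hstep, pvSweep t pt [] y y 1 (by omega)]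
    rw [levelsOfSorted]
    simp

-- ===== VERDICT (by name: the statement is the Claim_ definition above) =====
theorem find_levels_spec : Claim_equal_find_levels := by
  intro xs _
  unfold Spec_find_levels
  rw [pvBEq]
  show aLoop xs.length xs = _
  rw [pvAPerm xs.length (PySem.List.sorted xs (fun y => y) false).length
      xs (PySem.List.sorted xs (fun y => y) false) le_rfl le_rfl
      (PySem.List.sorted_perm xs (fun y => y) false).symm]
  exact pvAOnSorted (PySem.List.sorted xs (fun y => y) false).length _ le_rfl
    (by simpa using PySem.List.sorted_pairwise xs (fun y => y))
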